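-- pv_equiv track=rewrite | github.com/Bobby9228/lambs | scripts/pattern_counter.py | heuristic_cluster
-- ===== SOURCE A (Python) =====
-- from collections import defaultdict
--
-- TAG_GROUPS = {
--     "docker":  ["#docker", "#container", "#image", "#compose", "exit code", "oom killed"],
--     "deploy":  ["#deploy", "#rollout", "#release", "rollback", "deploy failed"],
--     "network": ["#network", "timeout", "connection refused", "unreachable", "#dns"],
--     "auth":    ["#auth", "#oauth", "token", "forbidden", "401", "403"],
--     "storage": ["#disk", "no space", "inode", "#storage", "disk full"],
--     "agent":   ["#agent", "agent", "main-agent", "#bot"],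
-- }
--
-- def heuristic_cluster(entries: list[str]) -> dict[str, list[str]]:
--     """Gruppiert HISTORY-Einträge anhand von TAG_GROUPS-Keywords (ML-frei)."""
--     clusters: dict[str, list[str]] = defaultdict(list)
--     for entry in entries:
--         entry_lower = entry.lower()
--         matched = False
--         for group, keywords in TAG_GROUPS.items():
--             if any(kw in entry_lower for kw in keywords):
--                 clusters[group].append(entry)
--                 matched = True
--                 break
--         if not matched:
--             clusters["misc"].append(entry)
--     return {k: v for k, v in clusters.items() if len(v) >= 3}
-- ===== SOURCE B (Python) =====
-- TAG_GROUPS = {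
--     "docker":  ["#docker", "#container", "#image", "#compose", "exit code", "oom killed"],
--     "deploy":  ["#deploy", "#rollout", "#release", "rollback", "deploy failed"],
--     "network": ["#network", "timeout", "connection refused", "unreachable", "#dns"],
--     "auth":    ["#auth", "#oauth", "token", "forbidden", "401", "403"],
--     "storage": ["#disk", "no space", "inode", "#storage", "disk full"],
--     "agent":   ["#agent", "agent", "main-agent", "#bot"],
-- }
--
--
-- def _classify(entry_lower: str) -> str:
--     for group, keywords in TAG_GROUPS.items():
--         if any(kw in entry_lower for kw in keywords):
--             return group
--     return "misc"
--
--
-- def heuristic_cluster(entries: list[str]) -> dict[str, list[str]]: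
--     """Label each entry once, then group by label (keys in first-occurrence order)."""
--     labels = [_classify(e.lower()) for e in entries]
--     order = list(dict.fromkeys(labels))
--     return {
--         g: [e for e, l in zip(entries, labels) if l == g]
--         for g in order
--         if labels.count(g) >= 3
--     }
-- ===== Notes on version B (the rewrite author's own statement) =====
-- stated objective: alternative
-- what changed: Instead of one pass appending each entry into a defaultdict and filtering at the end, B computes a label per entry once, derives the key order by deduplicating the label list, and builds each group's value list by a per-group comprehension with a count-based threshold test.
import Mathlib
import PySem

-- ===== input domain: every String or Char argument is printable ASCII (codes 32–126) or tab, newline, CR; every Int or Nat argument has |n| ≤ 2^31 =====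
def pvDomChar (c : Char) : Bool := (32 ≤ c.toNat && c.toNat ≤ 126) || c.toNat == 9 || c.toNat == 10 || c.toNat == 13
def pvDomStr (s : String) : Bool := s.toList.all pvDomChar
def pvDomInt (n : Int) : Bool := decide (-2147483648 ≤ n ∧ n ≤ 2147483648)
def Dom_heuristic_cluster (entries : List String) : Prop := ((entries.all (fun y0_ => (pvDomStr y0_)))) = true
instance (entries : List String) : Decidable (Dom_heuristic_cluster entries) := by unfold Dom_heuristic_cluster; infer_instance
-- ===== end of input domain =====

-- B re-groups by a per-entry label computed once (dedup of the label list gives the key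
-- order, a per-group comprehension the values) instead of A's incremental defaultdict
-- appends; an alternative decomposition of the same cost, not claimed faster.

-- TAG_GROUPS, shared module-level constant of both programs
def tagGroups : List (String × List String) :=
  [("docker",  ["#docker", "#container", "#image", "#compose", "exit code", "oom killed"]),
   ("deploy",  ["#deploy", "#rollout", "#release", "rollback", "deploy failed"]),
   ("network", ["#network", "timeout", "connection refused", "unreachable", "#dns"]),
   ("auth",    ["#auth", "#oauth", "token", "forbidden", "401", "403"]),
   ("storage", ["#disk", "no space", "inode", "#storage", "disk full"]),
   ("agent",   ["#agent", "agent", "main-agent", "#bot"])]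

-- ===== PORT A =====
-- A's inner 'for group, keywords in TAG_GROUPS.items(): … break' with the matched flag:
-- first matching group gets the append; exhausting the groups appends to "misc".
def aMatch (el entry : String) (d : PySem.Dict String (List String)) :
    List (String × List String) → PySem.Dict String (List String)
  | [] => d.modify "misc" [] (fun v => v ++ [entry])
  | (group, keywords) :: rest =>
      if keywords.any (fun kw => PySem.Str.isIn kw el) then
        d.modify group [] (fun v => v ++ [entry])
      else aMatch el entry d rest

def heuristic_cluster (entries : List String) : List (String × List String) :=
  let clusters := entries.foldl
    (fun d entry => aMatch (PySem.Str.lower entry) entry d tagGroups) PySem.Dict.empty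
  -- final dict comprehension {k: v for k, v in clusters.items() if len(v) >= 3}
  (PySem.Dict.ofList (clusters.items.filter (fun p => decide (3 ≤ p.2.length)))).items

-- ===== PORT B =====
-- B's _classify helper: first group whose keywords hit, else "misc"
def classify (el : String) : List (String × List String) → String
  | [] => "misc"
  | (group, keywords) :: rest =>
      if keywords.any (fun kw => PySem.Str.isIn kw el) then group else classify el rest

def heuristic_cluster_alt (entries : List String) : List (String × List String) :=
  let labels := entries.map (fun e => classify (PySem.Str.lower e) tagGroups)
  let order := PySem.List.dedup labels
  (order.filter (fun g => decide (3 ≤ labels.count g))).map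
    (fun g => (g, ((entries.zip labels).filter (fun p => p.2 == g)).map (fun p => p.1)))

-- ===== PRECONDITION & SPEC =====
def Spec_heuristic_cluster (entries : List String) (out : List (String × List String)) : Prop := out = heuristic_cluster_alt entries
instance (entries : List String) (out : List (String × List String)) : Decidable (Spec_heuristic_cluster entries out) := by unfold Spec_heuristic_cluster; infer_instance

-- ===== CLAIM (what is proved, stated in full; the proofs are below) =====
def Claim_equal_heuristic_cluster : Prop := ∀ (entries : List String), Dom_heuristic_cluster entries → Spec_heuristic_cluster entries (heuristic_cluster entries)

-- ===== LEMMAS AND PROOFS =====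

-- the label of one entry (proof-only abbreviation)
def labOf (e : String) : String := classify (PySem.Str.lower e) tagGroups

-- A's inner loop appends the entry exactly under B's classify label
theorem aMatch_eq_modify (el entry : String) (d : PySem.Dict String (List String))
    (groups : List (String × List String)) :
    aMatch el entry d groups = d.modify (classify el groups) [] (fun v => v ++ [entry]) := by
  induction groups with
  | nil => rfl
  | cons gk rest ih =>
      obtain ⟨g, kws⟩ := gk
      simp only [aMatch, classify]
      split <;> simp [ih]

-- both filtered collections are just the entries with label g, in order
theorem pairs_filter_eq (entries : List String) (g : String) :
    ((entries.map (fun e => (labOf e, e))).filter (fun p : String × String => p.1 == g)).map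
      (fun p : String × String => p.2)
      = entries.filter (fun e => labOf e == g) := by
  simp [List.filter_map, List.map_map, Function.comp_def]

theorem zip_filter_eq (entries : List String) (g : String) :
    (((entries.zip (entries.map labOf)).filter (fun p => p.2 == g)).map (fun p => p.1))
      = entries.filter (fun e => labOf e == g) := by
  rw [← List.map_prod_left_eq_zip]
  simp [List.filter_map, List.map_map, Function.comp_def]

-- the cluster dict after A's whole loop, in closed form
theorem clusters_items (entries : List String) :
    (entries.foldl (fun d entry => aMatch (PySem.Str.lower entry) entry d tagGroups)
        PySem.Dict.empty).items
      = (PySem.Set.ofList (entries.map labOf)).map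
          (fun g => (g, entries.filter (fun e => labOf e == g))) := by
  have hfold : entries.foldl (fun d entry => aMatch (PySem.Str.lower entry) entry d tagGroups)
      PySem.Dict.empty
      = (entries.map (fun e => (labOf e, e))).foldl
          (fun d p => d.modify p.1 [] (fun v => v ++ [p.2])) PySem.Dict.empty := by
    rw [List.foldl_map]
    simp only [aMatch_eq_modify, labOf]
  rw [hfold]
  have hnd : ((entries.map (fun e => (labOf e, e))).foldl
      (fun d p => d.modify p.1 [] (fun v => v ++ [p.2])) PySem.Dict.empty).keys.Nodup := by
    exact PySem.Dict.nodup_keys_foldl_modify_key (entries.map (fun e => (labOf e, e)))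
      (fun p : String × String => p.1) [] (fun _ p => (· ++ [p.2])) PySem.Dict.empty
      List.nodup_nil
  rw [PySem.Dict.items_eq_map_keys _ hnd []]
  simp only [PySem.Dict.keys_foldl_modify_key, PySem.Dict.keys_empty,
    PySem.Set.update_nil_left, List.map_map, Function.comp_def]
  apply List.map_congr_left
  intro g _
  rw [PySem.Dict.getD_foldl_modify_append]
  simp only [PySem.Dict.getD_empty, List.nil_append]
  exact congrArg _ (pairs_filter_eq entries g)

-- dict(pairs) with pairwise-distinct keys keeps the pair list as-is
theorem items_ofList_of_nodup_keys (l : List (String × List String))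
    (h : (l.map (fun p => p.1)).Nodup) :
    (PySem.Dict.ofList l).items = l := by
  have := PySem.Dict.items_foldl_insert_fresh l (fun p => p.1) (fun p => p.2)
    PySem.Dict.empty (fun a _ => by simp [PySem.Dict.contains_empty]) h
  simpa [PySem.Dict.ofList, PySem.Dict.update, PySem.Dict.empty, PySem.Dict.items] using this

-- ===== VERDICT (by name: the statement is the Claim_ definition above) =====
theorem heuristic_cluster_spec : Claim_equal_heuristic_cluster := by
  intro entries _
  show heuristic_cluster entries = heuristic_cluster_alt entries
  simp only [heuristic_cluster, heuristic_cluster_alt, ← labOf.eq_def]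
  rw [clusters_items, List.filter_map, items_ofList_of_nodup_keys]
  · simp only [PySem.List.dedup_eq_ofList, Function.comp_def]
    have hcnt : ∀ g : String,
        (entries.map labOf).count g = (entries.filter (fun e => labOf e == g)).length := by
      intro g
      rw [List.count_eq_countP, List.countP_map, ← List.countP_eq_length_filter]
      rfl
    simp only [hcnt, zip_filter_eq]
  · rw [List.map_map]
    simpa [Function.comp_def] using
      (List.filter_sublist.nodup (PySem.Set.nodup_ofList (entries.map labOf)))
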